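-- pv_equiv track=rewrite | github.com/Ilya0khiriv/updater_zero | updater.py | get_updates_chain
-- ===== SOURCE A (Python) =====
-- def version_to_tuple(version):
--     """Convert version string to tuple for comparison."""
--     try:
--         return tuple(map(int, version.split('.')))
--     except:
--         return (0, 0, 0)
--
-- def get_updates_chain(current, updates):
--     """Get list of updates needed to reach latest."""
--     chain = []
--     curr = current
--     while True:
--         candidates = [
--             (fv, tv, url) for fv, tv, url in updates
--             if version_to_tuple(fv) <= version_to_tuple(curr)
--         ]
--         if not candidates:
--             break
--         best = max(candidates, key=lambda x: version_to_tuple(x[1]))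
--         if version_to_tuple(best[1]) <= version_to_tuple(curr):
--             break
--         chain.append(best)
--         curr = best[1]
--     return chain
-- ===== SOURCE B (Python) =====
-- def version_to_tuple(version):
--     """Convert version string to tuple for comparison."""
--     try:
--         return tuple(map(int, version.split('.')))
--     except:
--         return (0, 0, 0)
--
-- def get_updates_chain(current, updates):
--     """Get list of updates needed to reach latest."""
--     # Sort-and-sweep: sort the updates once by source version; since the current
--     # version only ever increases, the eligible set only grows, so one pointer
--     # sweeps the sorted list exactly once, feeding a persistent running best
--     # (max by target version, ties to the earliest original position, which is
--     # what Python's max() picks).  No per-round rescan of the whole list.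
--     items = sorted(((version_to_tuple(u[0]), version_to_tuple(u[1]), i, u)
--                     for i, u in enumerate(updates)), key=lambda it: it[0])
--     chain = []
--     curr = version_to_tuple(current)
--     n = len(items)
--     i = 0
--     best = None
--     while True:
--         while i < n and items[i][0] <= curr:
--             it = items[i]
--             if best is None or it[1] > best[1] or (it[1] == best[1] and it[2] < best[2]):
--                 best = it
--             i += 1
--         if best is None or best[1] <= curr:
--             break
--         chain.append(best[3])
--         curr = best[1]
--     return chain
-- ===== Notes on version B (the rewrite author's own statement) =====
-- stated objective: faster
-- what changed: B replaces A's per-round rebuild-filter-and-max over the whole list by a sort-and-sweep: updates are parsed once and sorted by source version, and because the current version only increases, a single pointer sweeps the sorted list once while a persistent running best (max target version, ties to the earliest original index, matching Python's max) is maintained across rounds.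
import Mathlib
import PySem

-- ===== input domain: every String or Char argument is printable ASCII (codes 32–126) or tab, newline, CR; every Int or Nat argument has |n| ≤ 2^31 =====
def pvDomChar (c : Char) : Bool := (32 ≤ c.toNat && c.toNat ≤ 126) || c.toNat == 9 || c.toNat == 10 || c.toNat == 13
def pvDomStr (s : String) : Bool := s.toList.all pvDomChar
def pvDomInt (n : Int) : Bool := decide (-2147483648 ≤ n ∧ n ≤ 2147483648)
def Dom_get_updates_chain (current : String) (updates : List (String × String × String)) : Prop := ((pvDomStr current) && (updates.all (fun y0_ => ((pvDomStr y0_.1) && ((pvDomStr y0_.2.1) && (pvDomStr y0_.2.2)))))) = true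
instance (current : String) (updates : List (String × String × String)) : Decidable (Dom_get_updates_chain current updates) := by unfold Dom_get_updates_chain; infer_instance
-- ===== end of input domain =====

-- B replaces A's per-round rebuild-filter-and-max over the whole update list by a sort-and-sweep:
-- parse once, sort by source version, sweep one pointer (the current version only grows) feeding a
-- persistent running best with Python's max tie-break (earliest original index); objective: faster.

-- ===== PORT A =====
-- tuple(map(int, version.split('.'))) with the bare `except` returning (0,0,0);
-- a Python int tuple of any arity is modelled as List Int, whose `<`/`≤` are exactly
-- Python's lexicographic tuple comparison (a strict prefix compares smaller).
def version_to_tuple (version : String) : List Int :=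
  match ((PySem.Str.split? version ".").getD []).mapM PySem.Int.ofStr? with
  | some ts => ts
  | none => [0, 0, 0]

-- A's `while True` loop; `max?` is Python's max(..., key=...) (first maximal element),
-- and its `none` case is exactly Python's `if not candidates: break`.
-- Fuel updates.length + 1 is never exhausted: each iteration but the last appends an
-- update whose target version strictly exceeds all previously appended ones, so there
-- are at most updates.length appends before the loop breaks.
def get_updates_chain_loopA (updates : List (String × String × String)) :
    Nat → String → List (String × String × String) → List (String × String × String)
  | 0, _, chain => chain
  | fuel + 1, curr, chain =>
    match PySem.List.max?
        (updates.filter (fun u => decide (version_to_tuple u.1 ≤ version_to_tuple curr)))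
        (fun x => version_to_tuple x.2.1) with
    | none => chain
    | some best =>
      if version_to_tuple best.2.1 ≤ version_to_tuple curr then chain
      else get_updates_chain_loopA updates fuel best.2.1 (chain ++ [best])

def get_updates_chain (current : String) (updates : List (String × String × String)) : List (String × String × String) :=
  get_updates_chain_loopA updates (updates.length + 1) current []

-- ===== PORT B =====
-- B's item tuple (from_tuple, to_tuple, original_index, update_triple)
abbrev UpdItem : Type := List Int × List Int × Int × (String × String × String)

-- B's running-best condition: `best is None or it[1] > best[1] or (it[1] == best[1] and it[2] < best[2])`
def betterB (it : UpdItem) (best : Option UpdItem) : Bool :=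
  match best with
  | none => true
  | some b => decide (b.2.1 < it.2.1) || (decide (it.2.1 = b.2.1) && decide (it.2.2.1 < b.2.2.1))

-- B's worklist: sorted(((vt(fv), vt(tv), i, u) for i, u in enumerate(updates)), key=lambda it: it[0])
def annSortedB (updates : List (String × String × String)) : List UpdItem :=
  PySem.List.sorted
    ((PySem.List.enumerate updates).map
      (fun p => (version_to_tuple p.2.1, version_to_tuple p.2.2.1, p.1, p.2)))
    (fun it => it.1) false

-- B's inner `while i < n and items[i][0] <= curr` pointer sweep, returning the updated
-- running best and the unswept suffix
def absorbB (ct : List Int) : List UpdItem → Option UpdItem → Option UpdItem × List UpdItem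
  | [], best => (best, [])
  | it :: rest, best =>
    if it.1 ≤ ct then absorbB ct rest (if betterB it best then some it else best)
    else (best, it :: rest)

-- B's outer `while True` loop; same fuel bound as A's loop (at most updates.length appends)
def get_updates_chain_loopB :
    Nat → List Int → List UpdItem → Option UpdItem → List (String × String × String) →
    List (String × String × String)
  | 0, _, _, _, chain => chain
  | fuel + 1, ct, rem, best, chain =>
    match absorbB ct rem best with
    | (none, _) => chain
    | (some b, rem') =>
      if b.2.1 ≤ ct then chain
      else get_updates_chain_loopB fuel b.2.1 rem' (some b) (chain ++ [b.2.2.2])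

def get_updates_chain_alt (current : String) (updates : List (String × String × String)) : List (String × String × String) :=
  get_updates_chain_loopB (updates.length + 1) (version_to_tuple current) (annSortedB updates) none []

-- ===== PRECONDITION & SPEC =====
def Spec_get_updates_chain (current : String) (updates : List (String × String × String)) (out : List (String × String × String)) : Prop := out = get_updates_chain_alt current updates
instance (current : String) (updates : List (String × String × String)) (out : List (String × String × String)) : Decidable (Spec_get_updates_chain current updates out) := by unfold Spec_get_updates_chain; infer_instance

-- ===== CLAIM (what is proved, stated in full; the proofs are below) =====
def Claim_equal_get_updates_chain : Prop := ∀ (current : String) (updates : List (String × String × String)), Dom_get_updates_chain current updates → Spec_get_updates_chain current updates (get_updates_chain current updates)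

-- ===== LEMMAS AND PROOFS =====

-- the running-maximum step of Python's max(..., key=...): keep the first maximal element
def pvStep {α β : Type} [LinearOrder β] (k : α → β) (acc : Option α) (x : α) : Option α :=
  match acc with
  | none => some x
  | some m => if k m < k x then some x else some m

-- first-maximal element by key, the recursive characterisation of the running-maximum fold
def pvFM {α β : Type} [LinearOrder β] (k : α → β) : List α → Option α
  | [] => none
  | x :: t =>
    match pvFM k t with
    | none => some x
    | some m => if k x < k m then some m else some x

theorem pvFM_cons_none {α β : Type} [LinearOrder β] {k : α → β} {t : List α} (x : α)
    (ht : pvFM k t = none) : pvFM k (x :: t) = some x := by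
  simp [pvFM, ht]

theorem pvFM_cons_some {α β : Type} [LinearOrder β] {k : α → β} {t : List α} {m : α} (x : α)
    (ht : pvFM k t = some m) : pvFM k (x :: t) = if k x < k m then some m else some x := by
  simp [pvFM, ht]

theorem pvFM_head_le {α β : Type} [LinearOrder β] {k : α → β} {y z : α} {t : List α}
    (h : pvFM k (y :: t) = some z) : k y ≤ k z := by
  rcases ht : pvFM k t with _ | mt
  · rw [pvFM_cons_none y ht] at h; cases h; exact le_rfl
  · rw [pvFM_cons_some y ht] at h
    split_ifs at h with h2 <;> cases h
    · exact le_of_lt h2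
    · exact le_rfl

theorem pvFM_cons_ne_none {α β : Type} [LinearOrder β] {k : α → β} (x : α) (t : List α) :
    pvFM k (x :: t) ≠ none := by
  rcases ht : pvFM k t with _ | mt
  · rw [pvFM_cons_none x ht]; simp
  · rw [pvFM_cons_some x ht]; split_ifs <;> simp

theorem pvFM_foldl_some {α β : Type} [LinearOrder β] (k : α → β) (t : List α) :
    ∀ (a : α), t.foldl (pvStep k) (some a) = pvFM k (a :: t) := by
  induction t with
  | nil => intro a; rfl
  | cons y t ih =>
    intro a
    simp only [List.foldl_cons]
    show List.foldl (pvStep k) (if k a < k y then some y else some a) t = _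
    by_cases h1 : k a < k y
    · rw [if_pos h1, ih y]
      rcases hz : pvFM k (y :: t) with _ | z
      · exact absurd hz (pvFM_cons_ne_none y t)
      · rw [pvFM_cons_some a hz, if_pos (lt_of_lt_of_le h1 (pvFM_head_le hz))]
    · rw [if_neg h1, ih a]
      rcases ht : pvFM k t with _ | mt
      · rw [pvFM_cons_none a ht, pvFM_cons_some a (pvFM_cons_none y ht), if_neg h1]
      · by_cases h2 : k y < k mt
        · rw [pvFM_cons_some a ht,
            pvFM_cons_some a (show pvFM k (y :: t) = some mt by
              rw [pvFM_cons_some y ht, if_pos h2])]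
        · rw [pvFM_cons_some a ht,
            pvFM_cons_some a (show pvFM k (y :: t) = some y by
              rw [pvFM_cons_some y ht, if_neg h2]),
            if_neg h1, if_neg (not_lt.mpr (le_trans (not_lt.mp h2) (not_lt.mp h1)))]

theorem pvFM_foldl {α β : Type} [LinearOrder β] (k : α → β) (l : List α) :
    l.foldl (pvStep k) none = pvFM k l := by
  cases l with
  | nil => rfl
  | cons x t =>
    rw [List.foldl_cons]
    show List.foldl (pvStep k) (some x) t = _
    exact pvFM_foldl_some k t x

theorem max?_eq_pvFM {α : Type} (k : α → List Int) (l : List α) :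
    PySem.List.max? l k = pvFM k l := by
  rw [← pvFM_foldl]
  unfold PySem.List.max?
  congr 1
  funext acc x
  cases acc with
  | none => rfl
  | some m => by_cases h : k m < k x <;> simp [pvStep, h]

theorem pvFM_none_iff {α β : Type} [LinearOrder β] {k : α → β} {t : List α} :
    pvFM k t = none ↔ t = [] := by
  cases t with
  | nil => simp [pvFM]
  | cons x t => simp [pvFM_cons_ne_none x t]

theorem pvFM_isMax {α β : Type} [LinearOrder β] {k : α → β} {t : List α} {m : α}
    (h : pvFM k t = some m) : ∀ y ∈ t, k y ≤ k m := by
  induction t generalizing m with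
  | nil => simp [pvFM] at h
  | cons x t ih =>
    intro y hy
    rcases ht : pvFM k t with _ | mt
    · rw [pvFM_cons_none x ht] at h; cases h
      rcases List.mem_cons.mp hy with rfl | hyt
      · exact le_rfl
      · rw [pvFM_none_iff.mp ht] at hyt; cases hyt
    · rw [pvFM_cons_some x ht] at h
      rcases List.mem_cons.mp hy with rfl | hyt
      · split_ifs at h with h2 <;> cases h
        · exact le_of_lt h2
        · exact le_rfl
      · split_ifs at h with h2 <;> cases h
        · exact ih ht y hyt
        · exact le_trans (ih ht y hyt) (not_lt.mp h2)

theorem pvFM_mem {α β : Type} [LinearOrder β] {k : α → β} {t : List α} {m : α}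
    (h : pvFM k t = some m) : m ∈ t := by
  induction t generalizing m with
  | nil => simp [pvFM] at h
  | cons x t ih =>
    rcases ht : pvFM k t with _ | mt
    · rw [pvFM_cons_none x ht] at h; cases h; simp
    · rw [pvFM_cons_some x ht] at h
      split_ifs at h <;> cases h
      · exact List.mem_cons_of_mem _ (ih ht)
      · simp

theorem pvFM_map {α γ β : Type} [LinearOrder β] (f : α → γ) (k : γ → β) (l : List α) :
    pvFM k (l.map f) = (pvFM (fun a => k (f a)) l).map f := by
  induction l with
  | nil => rfl
  | cons x t ih =>
    rcases h : pvFM (fun a => k (f a)) t with _ | m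
    · rw [List.map_cons, pvFM_cons_none (f x) (by rw [ih, h]; rfl),
        pvFM_cons_none x h]
      rfl
    · rw [List.map_cons, pvFM_cons_some (f x) (show pvFM k (t.map f) = some (f m) by rw [ih, h]; rfl),
        pvFM_cons_some x h]
      split_ifs <;> rfl

-- pvFM picks the FIRST maximal element: everything before it is strictly smaller
theorem pvFM_first_max {α β : Type} [LinearOrder β] {k : α → β} {l : List α} {m : α}
    (h : pvFM k l = some m) :
    ∃ pre post, l = pre ++ m :: post ∧ ∀ y ∈ pre, k y < k m := by
  induction l generalizing m with
  | nil => simp [pvFM] at h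
  | cons x t ih =>
    rcases ht : pvFM k t with _ | mt
    · rw [pvFM_cons_none x ht] at h; cases h
      exact ⟨[], t, rfl, by simp⟩
    · rw [pvFM_cons_some x ht] at h
      split_ifs at h with h2 <;> cases h
      · obtain ⟨pre, post, hsplit, hpre⟩ := ih ht
        refine ⟨x :: pre, post, by rw [hsplit]; rfl, ?_⟩
        intro y hy
        rcases List.mem_cons.mp hy with rfl | hyp
        · exact h2
        · exact hpre y hyp
      · exact ⟨[], t, rfl, by simp⟩

-- "m beats every other element of l": a purely membership-based (hence permutation-invariant)
-- characterisation of the unique strict maximum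
def pvBeats {α β : Type} [LinearOrder β] (k : α → β) (l : List α) (m : α) : Prop :=
  m ∈ l ∧ ∀ y ∈ l, y = m ∨ k y < k m

theorem pvBeats_perm {α β : Type} [LinearOrder β] {k : α → β} {l l' : List α} {m : α}
    (hp : l.Perm l') (h : pvBeats k l m) : pvBeats k l' m :=
  ⟨hp.mem_iff.mp h.1, fun y hy => h.2 y (hp.mem_iff.mpr hy)⟩

theorem pvBeats_pvFM {α β : Type} [LinearOrder β] {k : α → β} {l : List α} {m : α}
    (h : pvBeats k l m) : pvFM k l = some m := by
  rcases hl : pvFM k l with _ | m'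
  · rw [pvFM_none_iff.mp hl] at h; cases h.1
  · rcases h.2 m' (pvFM_mem hl) with rfl | hlt
    · rfl
    · exact absurd (pvFM_isMax hl m h.1) (not_le.mpr hlt)

-- B's ordering key: target version first, then the NEGATED original index, lexicographically —
-- exactly "larger target version, ties to the earlier original position"
def kB (it : UpdItem) : Lex (List Int × Int) := toLex (it.2.1, -it.2.2.1)

theorem betterB_eq (it : UpdItem) (best : Option UpdItem) :
    (if betterB it best then some it else best) = pvStep kB best it := by
  rcases best with _ | b
  · rfl
  · show (if (decide (b.2.1 < it.2.1) || (decide (it.2.1 = b.2.1) && decide (it.2.2.1 < b.2.2.1)))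
        then some it else some b) = if kB b < kB it then some it else some b
    have hiff : (kB b < kB it) ↔ (b.2.1 < it.2.1 ∨ (it.2.1 = b.2.1 ∧ it.2.2.1 < b.2.2.1)) := by
      unfold kB
      rw [Prod.Lex.toLex_lt_toLex]
      constructor
      · rintro (h | ⟨heq, hlt⟩)
        · exact Or.inl h
        · exact Or.inr ⟨heq.symm, by omega⟩
      · rintro (h | ⟨heq, hlt⟩)
        · exact Or.inl h
        · exact Or.inr ⟨heq.symm, by omega⟩
    by_cases h : kB b < kB it
    · have hb : (decide (b.2.1 < it.2.1) || (decide (it.2.1 = b.2.1) && decide (it.2.2.1 < b.2.2.1))) = true := by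
        simp only [Bool.or_eq_true, Bool.and_eq_true, decide_eq_true_eq]
        exact hiff.mp h
      rw [if_pos h, if_pos hb]
    · have hb : ¬ ((decide (b.2.1 < it.2.1) || (decide (it.2.1 = b.2.1) && decide (it.2.2.1 < b.2.2.1))) = true) := by
        simp only [Bool.or_eq_true, Bool.and_eq_true, decide_eq_true_eq]
        exact fun hc => h (hiff.mpr hc)
      rw [if_neg h, if_neg hb]

-- the pointer sweep folds the running-best step over the eligible prefix and stops at the
-- first item whose source version exceeds the current version
theorem absorbB_spec (ct : List Int) :
    ∀ (rem : List UpdItem) (best : Option UpdItem),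
      ∃ taken rem', absorbB ct rem best = (List.foldl (pvStep kB) best taken, rem') ∧
        rem = taken ++ rem' ∧ (∀ it ∈ taken, it.1 ≤ ct) ∧
        (∀ it ∈ rem'.head?, ¬ it.1 ≤ ct) := by
  intro rem
  induction rem with
  | nil => exact fun best => ⟨[], [], rfl, rfl, by simp, by simp⟩
  | cons it rest ih =>
    intro best
    by_cases h : it.1 ≤ ct
    · obtain ⟨taken, rem', heq, hsplit, htaken, hhead⟩ := ih (if betterB it best then some it else best)
      refine ⟨it :: taken, rem', ?_, by rw [List.cons_append, hsplit], ?_, hhead⟩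
      · show absorbB ct (it :: rest) best = _
        rw [absorbB, if_pos h, heq, List.foldl_cons, betterB_eq]
      · intro y hy
        rcases List.mem_cons.mp hy with rfl | hyt
        · exact h
        · exact htaken y hyt
    · refine ⟨[], it :: rest, ?_, rfl, by simp, by simpa using h⟩
      show absorbB ct (it :: rest) best = _
      rw [absorbB, if_neg h]
      rfl

-- one-step equation lemmas for the two loops
theorem loopA_succ_none {updates : List (String × String × String)} {fuel : Nat} {curr : String}
    {chain : List (String × String × String)}
    (h : PySem.List.max?
        (updates.filter (fun u => decide (version_to_tuple u.1 ≤ version_to_tuple curr)))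
        (fun x => version_to_tuple x.2.1) = none) :
    get_updates_chain_loopA updates (fuel + 1) curr chain = chain := by
  simp [get_updates_chain_loopA, h]

theorem loopA_succ_some {updates : List (String × String × String)} {fuel : Nat} {curr : String}
    {chain : List (String × String × String)} {best : String × String × String}
    (h : PySem.List.max?
        (updates.filter (fun u => decide (version_to_tuple u.1 ≤ version_to_tuple curr)))
        (fun x => version_to_tuple x.2.1) = some best) :
    get_updates_chain_loopA updates (fuel + 1) curr chain
      = if version_to_tuple best.2.1 ≤ version_to_tuple curr then chain
        else get_updates_chain_loopA updates fuel best.2.1 (chain ++ [best]) := by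
  simp [get_updates_chain_loopA, h]

theorem loopB_succ_none {fuel : Nat} {ct : List Int} {rem : List UpdItem} {best : Option UpdItem}
    {chain : List (String × String × String)} {rem' : List UpdItem}
    (h : absorbB ct rem best = (none, rem')) :
    get_updates_chain_loopB (fuel + 1) ct rem best chain = chain := by
  simp [get_updates_chain_loopB, h]

theorem loopB_succ_some {fuel : Nat} {ct : List Int} {rem : List UpdItem} {best : Option UpdItem}
    {chain : List (String × String × String)} {b : UpdItem} {rem' : List UpdItem}
    (h : absorbB ct rem best = (some b, rem')) :
    get_updates_chain_loopB (fuel + 1) ct rem best chain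
      = if b.2.1 ≤ ct then chain
        else get_updates_chain_loopB fuel b.2.1 rem' (some b) (chain ++ [b.2.2.2]) := by
  simp [get_updates_chain_loopB, h]

-- B's item annotation
def annB (p : Int × (String × String × String)) : UpdItem :=
  (version_to_tuple p.2.1, version_to_tuple p.2.2.1, p.1, p.2)

theorem annSortedB_eq (updates : List (String × String × String)) :
    annSortedB updates
      = PySem.List.sorted ((PySem.List.enumerate updates).map annB) (fun it => it.1) false := rfl

-- PySem.List.sorted elaborated with the ambient LT/DecidableLT instances equals the one the
-- LinearOrder-based order lemmas are stated about (the instances are propositionally equal)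
theorem sorted_inst_swap (l : List UpdItem) (key : UpdItem → List Int) :
    PySem.List.sorted l key false
      = @PySem.List.sorted UpdItem (List Int) List.instLinearOrder.toLT LinearOrder.toDecidableLT l key false := by
  congr 1

-- ===== the main loop correspondence =====
theorem loops_eq (updates : List (String × String × String)) :
    ∀ (fuel : Nat) (curr : String) (done rem : List UpdItem)
      (chain : List (String × String × String)),
      done ++ rem = annSortedB updates →
      (∀ it ∈ done, it.1 ≤ version_to_tuple curr) →
      get_updates_chain_loopA updates fuel curr chain
        = get_updates_chain_loopB fuel (version_to_tuple curr) rem (pvFM kB done) chain := by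
  intro fuel
  induction fuel with
  | zero => intro curr done rem chain _ _; rfl
  | succ fuel ih =>
    intro curr done rem chain Hsplit Hdone
    set ct := version_to_tuple curr with hct
    obtain ⟨taken, rem', habs, hrem, htaken, hhead⟩ := absorbB_spec ct rem (pvFM kB done)
    set done' := done ++ taken with hdone'
    have hbest' : List.foldl (pvStep kB) (pvFM kB done) taken = pvFM kB done' := by
      rw [← pvFM_foldl kB done, ← List.foldl_append, pvFM_foldl]
    have hsplit' : done' ++ rem' = annSortedB updates := by
      rw [hdone', List.append_assoc, ← hrem, Hsplit]
    have hpw : (annSortedB updates).Pairwise (fun a b : UpdItem => a.1 ≤ b.1) := by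
      rw [annSortedB_eq, sorted_inst_swap]
      exact PySem.List.sorted_pairwise ((PySem.List.enumerate updates).map annB) (fun it : UpdItem => it.1)
    -- everything unswept has source version > ct
    have hrem' : ∀ it ∈ rem', ¬ it.1 ≤ ct := by
      rcases hr : rem' with _ | ⟨h0, rtail⟩
      · simp
      · have hh0 : ¬ h0.1 ≤ ct := by
          have := hhead h0; rw [hr] at this; exact this (by simp)
        have hpwr : (h0 :: rtail).Pairwise (fun a b : UpdItem => a.1 ≤ b.1) := by
          have hsub : (h0 :: rtail).Sublist (annSortedB updates) := by
            rw [← hsplit', hr]; exact List.sublist_append_right _ _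
          exact hpw.sublist hsub
        intro it hit
        rcases List.mem_cons.mp hit with rfl | hitt
        · exact hh0
        · exact fun hle => hh0 (le_trans (List.rel_of_pairwise_cons hpwr hitt) hle)
    have hdoneall : ∀ it ∈ done', it.1 ≤ ct := by
      intro it hit
      rcases List.mem_append.mp hit with h | h
      · exact Hdone it h
      · exact htaken it h
    -- the swept prefix is exactly the eligible part of the sorted worklist
    have hfilter : done' = (annSortedB updates).filter (fun it => decide (it.1 ≤ ct)) := by
      rw [← hsplit', List.filter_append,
        List.filter_eq_self.mpr (fun it hit => decide_eq_true (hdoneall it hit)),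
        List.filter_eq_nil_iff.mpr (fun it hit => by simpa using hrem' it hit),
        List.append_nil]
    set eligE := (PySem.List.enumerate updates).filter
      (fun p => decide (version_to_tuple p.2.1 ≤ ct)) with heligE
    have hpermBase : (annSortedB updates).Perm ((PySem.List.enumerate updates).map annB) := by
      rw [annSortedB_eq]; exact PySem.List.sorted_perm _ _ _
    have hmapfilter : ((PySem.List.enumerate updates).map annB).filter
        (fun it => decide (it.1 ≤ ct)) = eligE.map annB := by
      rw [heligE, List.filter_map]
      rfl
    have hperm : done'.Perm (eligE.map annB) := by
      rw [hfilter, ← hmapfilter]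
      exact hpermBase.filter _
    -- A's candidate list is the payload projection of the same eligible entries
    have hcand : updates.filter (fun u => decide (version_to_tuple u.1 ≤ ct))
        = eligE.map (fun p => p.2) := by
      conv_lhs => rw [← PySem.List.map_snd_enumerate updates 0]
      rw [heligE, List.filter_map]
      rfl
    have hmaxA : PySem.List.max? (updates.filter (fun u => decide (version_to_tuple u.1 ≤ ct)))
        (fun x => version_to_tuple x.2.1)
        = (pvFM (fun p : Int × (String × String × String) => version_to_tuple p.2.2.1) eligE).map
            (fun p => p.2) := by
      rw [hcand, max?_eq_pvFM,
        pvFM_map (fun p : Int × (String × String × String) => p.2)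
          (fun x : String × String × String => version_to_tuple x.2.1) eligE]
    rcases he : pvFM (fun p : Int × (String × String × String) => version_to_tuple p.2.2.1) eligE
      with _ | p
    · -- no candidates: both loops break immediately
      have hA := loopA_succ_none (updates := updates) (fuel := fuel) (curr := curr) (chain := chain)
        (by rw [hmaxA, he]; rfl)
      have hdnil : done' = [] := by
        have := hperm
        rw [pvFM_none_iff.mp he] at this
        simpa using this
      have hB := loopB_succ_none (fuel := fuel) (chain := chain)
        (habs.trans (by rw [hbest', hdnil]; rfl))
      rw [hA, hB]
    · -- candidate p found; its annotated item beats every eligible item under kB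
      have hbeats : pvBeats kB (eligE.map annB) (annB p) := by
        obtain ⟨pre, post, hsplitE, hpre⟩ := pvFM_first_max he
        have hmemp : p ∈ eligE := by rw [hsplitE]; simp
        refine ⟨List.mem_map_of_mem hmemp, ?_⟩
        intro y hy
        obtain ⟨q, hq, rfl⟩ := List.mem_map.mp hy
        have hmax := pvFM_isMax he q hq
        by_cases hqp : q = p
        · exact Or.inl (by rw [hqp])
        · refine Or.inr ?_
          show kB (annB q) < kB (annB p)
          unfold kB annB
          rw [Prod.Lex.toLex_lt_toLex]
          rcases lt_or_eq_of_le hmax with hlt | heq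
          · exact Or.inl hlt
          · refine Or.inr ⟨heq, ?_⟩
            have hqpost : q ∈ post := by
              rcases (by rw [hsplitE] at hq; exact List.mem_append.mp hq) with hqpre | hqc
              · exact absurd heq (ne_of_lt (hpre q hqpre))
              · rcases List.mem_cons.mp hqc with rfl | hqpost
                · exact absurd rfl hqp
                · exact hqpost
            have hpwE : eligE.Pairwise (fun a b : Int × (String × String × String) => a.1 < b.1) := by
              rw [heligE]
              exact (PySem.List.pairwise_lt_enumerate updates 0).sublist (List.filter_sublist)
            have hlt : p.1 < q.1 := by
              rw [hsplitE] at hpwE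
              exact List.rel_of_pairwise_cons ((List.pairwise_append.mp hpwE).2.1) hqpost
            show -q.1 < -p.1
            omega
      have hbB : pvFM kB done' = some (annB p) :=
        pvBeats_pvFM (pvBeats_perm hperm.symm hbeats)
      have hA := loopA_succ_some (updates := updates) (fuel := fuel) (curr := curr) (chain := chain)
        (best := p.2) (by rw [hmaxA, he]; rfl)
      have hB := loopB_succ_some (fuel := fuel) (chain := chain)
        (habs.trans (by rw [hbest', hbB]))
      rw [hA, hB]
      show (if version_to_tuple p.2.2.1 ≤ ct then chain
          else get_updates_chain_loopA updates fuel p.2.2.1 (chain ++ [p.2]))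
        = if version_to_tuple p.2.2.1 ≤ ct then chain
          else get_updates_chain_loopB fuel (version_to_tuple p.2.2.1) rem' (some (annB p))
            (chain ++ [p.2])
      by_cases hle : version_to_tuple p.2.2.1 ≤ ct
      · rw [if_pos hle, if_pos hle]
      · rw [if_neg hle, if_neg hle, ← hbB]
        refine ih p.2.2.1 done' rem' (chain ++ [p.2]) hsplit' ?_
        intro it hit
        exact le_trans (hdoneall it hit) (le_of_lt (not_le.mp hle))

-- ===== VERDICT (by name: the statement is the Claim_ definition above) =====
theorem get_updates_chain_spec : Claim_equal_get_updates_chain := by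
  intro current updates _
  unfold Spec_get_updates_chain get_updates_chain get_updates_chain_alt
  exact loops_eq updates (updates.length + 1) current [] (annSortedB updates) [] rfl (by simp)
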